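-- pv_equiv track=rewrite | github.com/rorycosgrove/property_search | packages/grants/discovery.py | _authority_for_host
-- ===== SOURCE A (Python) =====
-- def _authority_for_host(host: str) -> str:
--     authority_map: dict[str, str] = {
--         "gov.ie": "Government of Ireland",
--         "seai.ie": "Sustainable Energy Authority of Ireland",
--         "lda.ie": "Land Development Agency",
--         "housingagency.ie": "The Housing Agency",
--         "revenue.ie": "Revenue Commissioners",
--         "pobal.ie": "Pobal",
--         "nihe.gov.uk": "Northern Ireland Housing Executive",
--         "co-ownership.org": "Co-Ownership Housing",
--         "communities-ni.gov.uk": "Department for Communities (NI)",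
--         "citizensinformation.ie": "Citizens Information Board",
--     }
--     for domain, auth in authority_map.items():
--         if host == domain or host.endswith("." + domain):
--             return auth
--     return host.title()
-- ===== SOURCE B (Python) =====
-- def _authority_for_host(host: str) -> str:
--     authority_map: dict[str, str] = {
--         "gov.ie": "Government of Ireland",
--         "seai.ie": "Sustainable Energy Authority of Ireland",
--         "lda.ie": "Land Development Agency",
--         "housingagency.ie": "The Housing Agency",
--         "revenue.ie": "Revenue Commissioners",
--         "pobal.ie": "Pobal",
--         "nihe.gov.uk": "Northern Ireland Housing Executive",
--         "co-ownership.org": "Co-Ownership Housing",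
--         "communities-ni.gov.uk": "Department for Communities (NI)",
--         "citizensinformation.ie": "Citizens Information Board",
--     }
--     for i in range(len(host) + 1):
--         if i == 0 or host[i - 1] == ".":
--             auth = authority_map.get(host[i:])
--             if auth is not None:
--                 return auth
--     return host.title()
-- ===== Notes on version B (the rewrite author's own statement) =====
-- stated objective: alternative
-- what changed: B iterates over the host's dot-boundary positions and does a direct dict lookup of each dot-suffix, instead of scanning the whole authority map and testing each entry for equality or a dotted-suffix match with endswith.
import Mathlib
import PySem

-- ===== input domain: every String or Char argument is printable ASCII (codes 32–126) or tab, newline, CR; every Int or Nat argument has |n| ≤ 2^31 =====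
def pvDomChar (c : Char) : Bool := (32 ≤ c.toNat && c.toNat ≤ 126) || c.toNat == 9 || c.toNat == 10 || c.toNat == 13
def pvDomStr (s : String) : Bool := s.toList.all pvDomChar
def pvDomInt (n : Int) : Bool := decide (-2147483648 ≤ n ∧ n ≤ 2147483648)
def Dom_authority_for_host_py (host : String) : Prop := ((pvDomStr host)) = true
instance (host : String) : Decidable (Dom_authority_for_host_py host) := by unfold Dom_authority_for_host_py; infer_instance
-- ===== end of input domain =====

-- B drives the loop off the host's dot-boundary positions with direct dict lookups instead of
-- scanning the whole authority map with endswith tests (alternative decomposition, same cost here).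

-- str.title(), ported by hand (exact on the ASCII domain: a word boundary is any non-letter)
def pvTitleChars : List Char → Bool → List Char
  | [], _ => []
  | c :: cs, prev =>
    if PySem.Chars.isalpha c then
      (if prev then PySem.Chars.lowerChar c else PySem.Chars.upperChar c) :: pvTitleChars cs true
    else
      c :: pvTitleChars cs false

def pvTitle (host : String) : String := String.ofList (pvTitleChars host.toList false)

-- the dict literal both sources build (distinct keys, insertion order)
def pvAuthorityMap : List (String × String) :=
  [ ("gov.ie", "Government of Ireland"),
    ("seai.ie", "Sustainable Energy Authority of Ireland"),
    ("lda.ie", "Land Development Agency"),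
    ("housingagency.ie", "The Housing Agency"),
    ("revenue.ie", "Revenue Commissioners"),
    ("pobal.ie", "Pobal"),
    ("nihe.gov.uk", "Northern Ireland Housing Executive"),
    ("co-ownership.org", "Co-Ownership Housing"),
    ("communities-ni.gov.uk", "Department for Communities (NI)"),
    ("citizensinformation.ie", "Citizens Information Board") ]

-- ===== PORT A =====
-- A: for domain, auth in authority_map.items(): if host == domain or host.endswith("." + domain): return auth
def pvLoopA (host : String) : List (String × String) → String
  | [] => pvTitle host
  | (domain, auth) :: rest =>
    if host == domain || PySem.Str.endswith host (PySem.Str.join "" [".", domain]) then auth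
    else pvLoopA host rest

def authority_for_host_py (host : String) : String := pvLoopA host pvAuthorityMap

-- ===== PORT B =====
def pvAuthorityDict : PySem.Dict String String := PySem.Dict.ofList pvAuthorityMap

-- B: for i in range(len(host)+1): if i == 0 or host[i-1] == ".": auth = authority_map.get(host[i:]); if auth is not None: return auth
def pvLoopB (host : String) : List Int → String
  | [] => pvTitle host
  | i :: rest =>
    if i == 0 || PySem.Str.pyGet? host (i - 1) == some '.' then
      match pvAuthorityDict.get? (PySem.Str.slice host (some i) none) with
      | some auth => auth
      | none => pvLoopB host rest
    else pvLoopB host rest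

def authority_for_host_py_alt (host : String) : String :=
  pvLoopB host (PySem.List.pyRange 0 (PySem.Str.len host + 1) 1)

-- ===== PRECONDITION & SPEC =====
def Spec_authority_for_host_py (host : String) (out : String) : Prop := out = authority_for_host_py_alt host
instance (host : String) (out : String) : Decidable (Spec_authority_for_host_py host out) := by unfold Spec_authority_for_host_py; infer_instance

-- ===== CLAIM (what is proved, stated in full; the proofs are below) =====
def Claim_equal_authority_for_host_py : Prop := ∀ (host : String), Dom_authority_for_host_py host → Spec_authority_for_host_py host (authority_for_host_py host)

-- ===== LEMMAS AND PROOFS =====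

-- "domain matches host" as A tests it, at the character-list level
def pvCond (k cs : List Char) : Prop := cs = k ∨ ('.' :: k) <:+ cs

theorem pvCond_bool (host d : String) :
    (host == d || PySem.Str.endswith host (PySem.Str.join "" [".", d])) = true
      ↔ pvCond d.toList host.toList := by
  unfold pvCond
  have hj : (PySem.Str.join "" [".", d]).toList = '.' :: d.toList := by
    rw [PySem.Str.toList_join]
    simp [PySem.Chars.join_cons_cons, PySem.Chars.join_singleton]
  constructor
  · intro h
    rcases Bool.or_eq_true_iff.mp h with h | h
    · left; rw [String.toList_inj]; exact eq_of_beq h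
    · right
      rw [PySem.Str.endswith_eq, PySem.Chars.endswith_iff, hj] at h
      exact h
  · intro h
    rcases h with h | h
    · exact Bool.or_eq_true_iff.mpr (Or.inl (beq_iff_eq.mpr (String.toList_inj.mp h)))
    · refine Bool.or_eq_true_iff.mpr (Or.inr ?_)
      rw [PySem.Str.endswith_eq, PySem.Chars.endswith_iff, hj]
      exact h

-- a domain matches iff it is the suffix of host starting at some dot boundary
theorem pvCond_iff_boundary (k cs : List Char) :
    pvCond k cs ↔ ∃ j : Nat, j ≤ cs.length ∧ (j = 0 ∨ cs[j-1]? = some '.') ∧ cs.drop j = k := by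
  unfold pvCond
  constructor
  · rintro (rfl | ⟨t, ht⟩)
    · exact ⟨0, Nat.zero_le _, Or.inl rfl, rfl⟩
    · refine ⟨t.length + 1, ?_, Or.inr ?_, ?_⟩
      · rw [← ht]; simp
      · rw [← ht]; simp
      · rw [← ht, show t ++ '.' :: k = (t ++ ['.']) ++ k by simp,
            List.drop_left' (by simp)]
  · rintro ⟨j, hj, hb, hd⟩
    cases j with
    | zero => left; simpa using hd
    | succ j' =>
      right
      have hb' : cs[j']? = some '.' := by
        rcases hb with h | h
        · omega
        · simpa using h
      refine ⟨cs.take j', ?_⟩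
      have h2 : cs.take (j' + 1) = cs.take j' ++ ['.'] := by
        rw [List.take_add_one, hb']; rfl
      calc cs.take j' ++ '.' :: k = (cs.take j' ++ ['.']) ++ k := by simp
        _ = cs.take (j' + 1) ++ cs.drop (j' + 1) := by rw [h2, hd]
        _ = cs := List.take_append_drop _ _

theorem pvSuffix_of_suffix {α : Type} {l1 l2 l3 : List α} (h1 : l1 <:+ l3) (h2 : l2 <:+ l3)
    (hle : l1.length ≤ l2.length) : l1 <:+ l2 := by
  rw [← List.reverse_prefix] at h1 h2 ⊢
  obtain ⟨t1, ht1⟩ := h1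
  obtain ⟨t2, ht2⟩ := h2
  have e1 : l1.reverse = (l3.reverse).take l1.length := by rw [← ht1]; simp
  have e2 : l2.reverse = (l3.reverse).take l2.length := by rw [← ht2]; simp
  rw [e1, e2]
  have h : List.take l1.length l3.reverse = List.take l1.length (List.take l2.length l3.reverse) := by
    rw [List.take_take, Nat.min_eq_left hle]
  rw [h]; exact List.take_prefix _ _

-- two matching domains must be related as lists
theorem pvCond_both {k1 k2 cs : List Char} (h1 : pvCond k1 cs) (h2 : pvCond k2 cs) :
    k1 = k2 ∨ ('.' :: k1) <:+ k2 ∨ ('.' :: k2) <:+ k1 ∨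
      ('.' :: k1) <:+ ('.' :: k2) ∨ ('.' :: k2) <:+ ('.' :: k1) := by
  rcases h1 with rfl | h1 <;> rcases h2 with h2 | h2
  · exact Or.inl h2
  · exact Or.inr (Or.inr (Or.inl h2))
  · exact Or.inr (Or.inl (h2 ▸ h1))
  · rcases Nat.le_total ('.' :: k1).length ('.' :: k2).length with hle | hle
    · exact Or.inr (Or.inr (Or.inr (Or.inl (pvSuffix_of_suffix h1 h2 hle))))
    · exact Or.inr (Or.inr (Or.inr (Or.inr (pvSuffix_of_suffix h2 h1 hle))))

-- the concrete table: distinct keys, none a dot-suffix of another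
theorem pvMapFacts : ∀ p ∈ pvAuthorityMap, ∀ q ∈ pvAuthorityMap,
    (p.1 = q.1 → p = q) ∧ ¬(('.' :: p.1.toList) <:+ q.1.toList) ∧
      (p.1 ≠ q.1 → ¬(('.' :: p.1.toList) <:+ ('.' :: q.1.toList))) := by
  decide

-- at most one authority-map entry can match a given host
theorem pvUnique {host : String} {p q : String × String} (hp : p ∈ pvAuthorityMap)
    (hq : q ∈ pvAuthorityMap) (hcp : pvCond p.1.toList host.toList)
    (hcq : pvCond q.1.toList host.toList) : p = q := by
  rcases pvCond_both hcp hcq with h | h | h | h | h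
  · exact (pvMapFacts p hp q hq).1 (String.toList_inj.mp h)
  · exact absurd h (pvMapFacts p hp q hq).2.1
  · exact absurd h (pvMapFacts q hq p hp).2.1
  · by_cases hpq : p.1 = q.1
    · exact (pvMapFacts p hp q hq).1 hpq
    · exact absurd h ((pvMapFacts p hp q hq).2.2 hpq)
  · by_cases hpq : q.1 = p.1
    · exact ((pvMapFacts q hq p hp).1 hpq).symm
    · exact absurd h ((pvMapFacts q hq p hp).2.2 hpq)

theorem pvDictGetKey : ∀ p ∈ pvAuthorityMap, pvAuthorityDict.get? p.1 = some p.2 := by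
  decide

theorem pvDictGet_mem (s a : String) (h : pvAuthorityDict.get? s = some a) :
    (s, a) ∈ pvAuthorityMap := by
  have hnd : pvAuthorityDict.keys.Nodup := by decide
  have hi : pvAuthorityDict.items = pvAuthorityMap := by decide
  have hm := (PySem.Dict.get?_eq_some_iff_mem_items pvAuthorityDict s a hnd).mp h
  rwa [hi] at hm

theorem pvLoopA_title (host : String) (ps : List (String × String))
    (h : ∀ p ∈ ps, ¬ pvCond p.1.toList host.toList) : pvLoopA host ps = pvTitle host := by
  induction ps with
  | nil => rfl
  | cons p rest ih =>
    obtain ⟨d, a⟩ := p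
    show (if _ then _ else _) = _
    rw [if_neg, ih (fun q hq => h q (List.mem_cons_of_mem _ hq))]
    intro hc
    exact h (d, a) List.mem_cons_self ((pvCond_bool host d).mp hc)

theorem pvLoopA_val (host : String) (ps : List (String × String)) (v : String)
    (hex : ∃ p ∈ ps, pvCond p.1.toList host.toList)
    (hall : ∀ p ∈ ps, pvCond p.1.toList host.toList → p.2 = v) : pvLoopA host ps = v := by
  induction ps with
  | nil => obtain ⟨p, hp, _⟩ := hex; exact absurd hp (List.not_mem_nil)
  | cons p rest ih =>
    obtain ⟨d, a⟩ := p
    show (if _ then _ else _) = _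
    by_cases hc : (host == d || PySem.Str.endswith host (PySem.Str.join "" [".", d])) = true
    · rw [if_pos hc]
      exact hall (d, a) List.mem_cons_self ((pvCond_bool host d).mp hc)
    · rw [if_neg hc]
      refine ih ?_ (fun q hq hcq => hall q (List.mem_cons_of_mem _ hq) hcq)
      obtain ⟨q, hq, hcq⟩ := hex
      rcases List.mem_cons.mp hq with rfl | hq'
      · exact absurd ((pvCond_bool host d).mpr hcq) hc
      · exact ⟨q, hq', hcq⟩

-- one iteration of B's loop, as an Option
def pvStep (host : String) (i : Int) : Option String :=
  if i == 0 || PySem.Str.pyGet? host (i - 1) == some '.' then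
    pvAuthorityDict.get? (PySem.Str.slice host (some i) none)
  else none

theorem pvLoopB_cons (host : String) (i : Int) (rest : List Int) :
    pvLoopB host (i :: rest) =
      match pvStep host i with
      | some a => a
      | none => pvLoopB host rest := by
  show (if _ then _ else _) = _
  unfold pvStep
  by_cases hb : (i == 0 || PySem.Str.pyGet? host (i - 1) == some '.') = true
  · rw [if_pos hb, if_pos hb]
  · rw [if_neg hb, if_neg hb]

theorem pvLoopB_title (host : String) (is : List Int)
    (h : ∀ i ∈ is, pvStep host i = none) : pvLoopB host is = pvTitle host := by
  induction is with
  | nil => rfl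
  | cons i rest ih =>
    rw [pvLoopB_cons, h i List.mem_cons_self]
    exact ih (fun j hj => h j (List.mem_cons_of_mem _ hj))

theorem pvLoopB_val (host : String) (is : List Int) (v : String)
    (hex : ∃ i ∈ is, pvStep host i ≠ none)
    (hall : ∀ i ∈ is, ∀ a, pvStep host i = some a → a = v) : pvLoopB host is = v := by
  induction is with
  | nil => obtain ⟨i, hi, _⟩ := hex; exact absurd hi (List.not_mem_nil)
  | cons i rest ih =>
    rw [pvLoopB_cons]
    cases hstep : pvStep host i with
    | some a => exact hall i List.mem_cons_self a hstep
    | none =>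
      refine ih ?_ (fun j hj a ha => hall j (List.mem_cons_of_mem _ hj) a ha)
      obtain ⟨j, hj, hne⟩ := hex
      rcases List.mem_cons.mp hj with rfl | hj'
      · exact absurd hstep hne
      · exact ⟨j, hj', hne⟩

theorem pvSlice_toList (host : String) (j : Nat) :
    (PySem.Str.slice host (some (j : Int)) none).toList = host.toList.drop j := by
  rw [PySem.Str.toList_slice, PySem.Chars.slice_eq_listSlice]
  have hs := PySem.List.slice_from (xs := host.toList) (a := (j : Int)) (Int.natCast_nonneg j)
  rw [hs, Int.toNat_natCast]

-- what B's step means at a natural index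
theorem pvStep_some (host : String) (j : Nat) (a : String) (h : pvStep host (j : Int) = some a) :
    ∃ p ∈ pvAuthorityMap, p.2 = a ∧ (j = 0 ∨ host.toList[j-1]? = some '.') ∧ host.toList.drop j = p.1.toList := by
  unfold pvStep at h
  split_ifs at h with hc
  have hmem := pvDictGet_mem _ _ h
  refine ⟨_, hmem, rfl, ?_, (pvSlice_toList host j).symm⟩
  by_cases hj0 : j = 0
  · exact Or.inl hj0
  · right
    rcases Bool.or_eq_true_iff.mp hc with hc | hc
    · exact absurd (by exact_mod_cast eq_of_beq hc) hj0
    · have hcast : ((j : Int) - 1) = ((j - 1 : Nat) : Int) := by omega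
      rw [hcast, PySem.Str.pyGet?_natCast] at hc
      exact eq_of_beq hc

theorem pvStep_of_match (host : String) (j : Nat) (p : String × String) (hp : p ∈ pvAuthorityMap)
    (hb : j = 0 ∨ host.toList[j-1]? = some '.') (hd : host.toList.drop j = p.1.toList) :
    pvStep host (j : Int) = some p.2 := by
  unfold pvStep
  have hkey : PySem.Str.slice host (some (j : Int)) none = p.1 :=
    String.toList_inj.mp ((pvSlice_toList host j).trans hd)
  have hc : ((j : Int) == 0 || PySem.Str.pyGet? host ((j : Int) - 1) == some '.') = true := by
    by_cases hj0 : j = 0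
    · subst hj0; simp
    · refine Bool.or_eq_true_iff.mpr (Or.inr ?_)
      have hb' : host.toList[j-1]? = some '.' := hb.resolve_left hj0
      have hcast : ((j : Int) - 1) = ((j - 1 : Nat) : Int) := by omega
      rw [hcast, PySem.Str.pyGet?_natCast, hb']
      simp
  rw [if_pos hc, hkey]
  exact pvDictGetKey p hp

theorem pvMain (host : String) : authority_for_host_py host = authority_for_host_py_alt host := by
  unfold authority_for_host_py authority_for_host_py_alt
  have hlen : PySem.Str.len host + 1 = ((host.toList.length + 1 : Nat) : Int) := by
    rw [PySem.Str.len_eq]; push_cast; ring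
  rw [hlen, PySem.List.pyRange_one]
  have hmem : ∀ i ∈ (List.range ((((host.toList.length + 1 : Nat) : Int) - 0).toNat)).map
      (fun k : Nat => (0 : Int) + (k : Int)), ∃ j : Nat, j ≤ host.toList.length ∧ i = (j : Int) := by
    intro i hi
    obtain ⟨k, hk, rfl⟩ := List.mem_map.mp hi
    have hk' := List.mem_range.mp hk
    exact ⟨k, by omega, by ring⟩
  by_cases hm : ∃ p ∈ pvAuthorityMap, pvCond p.1.toList host.toList
  · obtain ⟨p, hp, hcp⟩ := hm
    rw [pvLoopA_val host _ p.2 ⟨p, hp, hcp⟩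
      (fun q hq hcq => by rw [pvUnique hq hp hcq hcp])]
    refine (pvLoopB_val host _ p.2 ?_ ?_).symm
    · obtain ⟨j, hjle, hb, hd⟩ := (pvCond_iff_boundary p.1.toList host.toList).mp hcp
      refine ⟨(0 : Int) + (j : Int), ?_, ?_⟩
      · exact List.mem_map.mpr ⟨j, List.mem_range.mpr (by omega), rfl⟩
      · rw [show (0 : Int) + (j : Int) = (j : Int) by ring,
            pvStep_of_match host j p hp hb hd]
        simp
    · intro i hi a ha
      obtain ⟨j, hjle, rfl⟩ := hmem i hi
      obtain ⟨q, hq, hqa, hb', hd'⟩ := pvStep_some host j a ha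
      have hcq : pvCond q.1.toList host.toList :=
        (pvCond_iff_boundary q.1.toList host.toList).mpr ⟨j, hjle, hb', hd'⟩
      rw [← hqa, pvUnique hq hp hcq hcp]
  · rw [pvLoopA_title host _ (fun p hp hc => hm ⟨p, hp, hc⟩)]
    refine (pvLoopB_title host _ ?_).symm
    intro i hi
    obtain ⟨j, hjle, rfl⟩ := hmem i hi
    cases hstep : pvStep host (j : Int) with
    | none => rfl
    | some a =>
      obtain ⟨q, hq, _, hb', hd'⟩ := pvStep_some host j a hstep
      exact absurd ⟨q, hq, (pvCond_iff_boundary q.1.toList host.toList).mpr ⟨j, hjle, hb', hd'⟩⟩ hm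

-- ===== VERDICT (by name: the statement is the Claim_ definition above) =====
theorem authority_for_host_py_spec : Claim_equal_authority_for_host_py := by
  intro host _
  unfold Spec_authority_for_host_py
  exact pvMain host
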